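-- pv_equiv track=rewrite | github.com/DiegoRS2/Prova_inteligencia_artificial | gps.py | gerar_cidade
-- ===== SOURCE A (Python) =====
-- def gerar_cidade(linhas, colunas):
--     cidade = [[0 for _ in range(colunas)] for _ in range(linhas)]
--
--     # Adiciona ruas horizontais
--     for i in range(1, linhas, 2):
--         cidade[i] = [1] * colunas
--
--     # Adiciona ruas verticais
--     for j in range(1, colunas, 2):
--         for i in range(linhas):
--             cidade[i][j] = 1
--
--     # Adiciona interseções aleatórias
--     for i in range(1, linhas, 2):
--         for j in range(1, colunas, 2):
--             cidade[i][j] = 1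
--
--     return cidade
-- ===== SOURCE B (Python) =====
-- def gerar_cidade(linhas, colunas):
--     return [[1 if (i % 2 == 1 or j % 2 == 1) else 0 for j in range(colunas)]
--             for i in range(linhas)]
-- ===== Notes on version B (the rewrite author's own statement) =====
-- stated objective: simpler
-- what changed: B computes every cell directly from the coordinate predicate 'row odd or column odd' in a single comprehension, instead of A's zero-initialized grid overwritten by three stripe-setting passes.
import Mathlib
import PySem

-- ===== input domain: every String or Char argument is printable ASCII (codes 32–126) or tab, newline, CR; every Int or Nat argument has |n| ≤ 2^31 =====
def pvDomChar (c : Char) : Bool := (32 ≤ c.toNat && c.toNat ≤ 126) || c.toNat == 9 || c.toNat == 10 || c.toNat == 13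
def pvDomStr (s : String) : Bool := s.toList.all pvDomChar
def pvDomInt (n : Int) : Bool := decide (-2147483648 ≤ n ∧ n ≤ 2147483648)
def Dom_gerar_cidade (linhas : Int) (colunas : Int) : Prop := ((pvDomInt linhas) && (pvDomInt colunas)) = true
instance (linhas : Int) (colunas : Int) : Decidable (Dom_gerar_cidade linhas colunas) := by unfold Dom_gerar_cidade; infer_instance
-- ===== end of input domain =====

-- B builds each cell directly from the parity predicate "i odd or j odd" in a single
-- comprehension, replacing A's zero grid plus three overwrite passes (objective: simpler).

-- ===== PORT A =====
-- Literal port: zero grid, then row stripes (cidade[i] = [1]*colunas), then column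
-- stripes (cidade[i][j] = 1), then the "intersections" pass.  [1]*colunas with a
-- negative count is the empty list, exactly List.replicate colunas.toNat.
def gerar_cidade (linhas : Int) (colunas : Int) : List (List Int) :=
  let cidade : List (List Int) :=
    (PySem.List.pyRange 0 linhas 1).map (fun _ =>
      (PySem.List.pyRange 0 colunas 1).map (fun _ => (0 : Int)))
  let cidade :=
    (PySem.List.pyRange 1 linhas 2).foldl (fun c i =>
      PySem.List.pySetD c i (List.replicate colunas.toNat (1 : Int))) cidade
  let cidade :=
    (PySem.List.pyRange 1 colunas 2).foldl (fun c j =>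
      (PySem.List.pyRange 0 linhas 1).foldl (fun c i =>
        PySem.List.pySetD c i (PySem.List.pySetD (PySem.List.pyGetD c i []) j 1)) c) cidade
  let cidade :=
    (PySem.List.pyRange 1 linhas 2).foldl (fun c i =>
      (PySem.List.pyRange 1 colunas 2).foldl (fun c j =>
        PySem.List.pySetD c i (PySem.List.pySetD (PySem.List.pyGetD c i []) j 1)) c) cidade
  cidade

-- ===== PORT B =====
def gerar_cidade_alt (linhas : Int) (colunas : Int) : List (List Int) :=
  (PySem.List.pyRange 0 linhas 1).map (fun i =>
    (PySem.List.pyRange 0 colunas 1).map (fun j =>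
      if PySem.Int.mod i 2 = 1 ∨ PySem.Int.mod j 2 = 1 then (1 : Int) else 0))

-- ===== PRECONDITION & SPEC =====
def Spec_gerar_cidade (linhas : Int) (colunas : Int) (out : List (List Int)) : Prop := out = gerar_cidade_alt linhas colunas
instance (linhas : Int) (colunas : Int) (out : List (List Int)) : Decidable (Spec_gerar_cidade linhas colunas out) := by unfold Spec_gerar_cidade; infer_instance

-- ===== CLAIM (what is proved, stated in full; the proofs are below) =====
def Claim_equal_gerar_cidade : Prop := ∀ (linhas : Int) (colunas : Int), Dom_gerar_cidade linhas colunas → Spec_gerar_cidade linhas colunas (gerar_cidade linhas colunas)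

-- ===== LEMMAS AND PROOFS =====

-- the common form both programs compute: cell (i, j) is 1 iff i or j is odd
def pvG (L C : Nat) : List (List Int) :=
  (List.range L).map (fun i =>
    (List.range C).map (fun j => if i % 2 = 1 ∨ j % 2 = 1 then (1 : Int) else 0))

theorem pvRange01 (n : Int) :
    PySem.List.pyRange 0 n 1 = List.map (fun k : Nat => (k : Int)) (List.range n.toNat) := by
  rw [PySem.List.pyRange_of_pos 0 n (by norm_num)]
  have h : (if (0:Int) < n then ((n - 0 + 1 - 1) / 1).toNat else 0) = n.toNat := by
    split <;> omega
  rw [h]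
  apply List.map_congr_left
  intro k _
  push_cast
  ring

theorem pvNodupRange (a b s : Int) (hs : 0 < s) : (PySem.List.pyRange a b s).Nodup := by
  rw [PySem.List.pyRange_of_pos a b hs]
  exact (List.nodup_range).map (fun x y h => by
    have : s * (x:Int) = s * y := by omega
    exact_mod_cast mul_left_cancel₀ (by omega) this)

theorem pvLenSet {α : Type} (xs : List α) (i : Int) (v : α) :
    (PySem.List.pySetD xs i v).length = xs.length := by
  unfold PySem.List.pySetD PySem.List.pySet?
  cases PySem.List.pyIdx? xs.length i <;> simp

theorem pvLenFold {α : Type} (f : List α → Int → α) :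
    ∀ (is : List Int) (xs : List α),
      (is.foldl (fun c i => PySem.List.pySetD c i (f c i)) xs).length = xs.length := by
  intro is
  induction is with
  | nil => intro xs; rfl
  | cons i rest ih => intro xs; simp only [List.foldl_cons]; rw [ih, pvLenSet]

theorem pvGetSet {α : Type} (xs : List α) (i : Int) (hi : 0 ≤ i) (v : α) (k : Nat) :
    (PySem.List.pySetD xs i v)[k]? =
      if i = (k : Int) ∧ k < xs.length then some v else xs[k]? := by
  unfold PySem.List.pySetD PySem.List.pySet? PySem.List.pyIdx?
  split_ifs with h1 h2 h3 h4 h5 <;>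
    simp_all [List.getElem?_set] <;> omega

-- constant-value pass: foldl of cidade[i] = v over nonnegative indices, read off at k
theorem pvGetConstFold {α : Type} (v : α) :
    ∀ (is : List Int) (xs : List α), (∀ i ∈ is, 0 ≤ i) → ∀ (k : Nat),
      (is.foldl (fun c i => PySem.List.pySetD c i v) xs)[k]? =
        if (k : Int) ∈ is ∧ k < xs.length then some v else xs[k]? := by
  intro is
  induction is with
  | nil => intro xs _ k; simp
  | cons i rest ih =>
    intro xs h0 k
    simp only [List.foldl_cons]
    rw [ih _ (fun j hj => h0 j (List.mem_cons_of_mem _ hj)) k, pvLenSet,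
      pvGetSet xs i (h0 i (List.mem_cons_self)) v k]
    by_cases hk : (k : Int) ∈ rest <;> by_cases hik : i = (k : Int) <;>
      by_cases hlen : k < xs.length <;> simp_all <;>
      (intro h; exact absurd h.symm hik)

-- read-modify-write pass: foldl of cidade[i] = g(cidade[i]) over distinct nonneg indices
theorem pvGetModify {α : Type} (g : α → α) (d : α) :
    ∀ (is : List Int) (xs : List α), (∀ i ∈ is, 0 ≤ i) → is.Nodup → ∀ (k : Nat),
      (is.foldl (fun c i => PySem.List.pySetD c i (g (PySem.List.pyGetD c i d))) xs)[k]? =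
        if (k : Int) ∈ is then (xs[k]?).map g else xs[k]? := by
  intro is
  induction is with
  | nil => intro xs _ _ k; simp
  | cons i rest ih =>
    intro xs h0 hnd k
    simp only [List.foldl_cons]
    have hi : 0 ≤ i := h0 i List.mem_cons_self
    rw [ih _ (fun j hj => h0 j (List.mem_cons_of_mem _ hj)) (List.Nodup.of_cons hnd) k]
    have hc1 : (PySem.List.pySetD xs i (g (PySem.List.pyGetD xs i d)))[k]? =
        if i = (k : Int) then (xs[k]?).map g else xs[k]? := by
      rw [pvGetSet xs i hi _ k]
      by_cases hik : i = (k : Int)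
      · subst hik
        by_cases hlen : k < xs.length
        · rw [PySem.List.pyGetD_natCast xs k d]
          simp [hlen, List.getD_eq_getElem?_getD, List.getElem?_eq_getElem hlen]
        · have hx : xs[k]? = none := List.getElem?_eq_none_iff.2 (by omega)
          simp [hlen, hx]
      · simp [hik]
    by_cases hk : (k : Int) ∈ rest
    · have hne : i ≠ (k : Int) := fun h => (List.nodup_cons.1 hnd).1 (h ▸ hk)
      have hm : (k : Int) ∈ i :: rest := List.mem_cons_of_mem _ hk
      rw [if_pos hk, if_pos hm, hc1, if_neg hne]
    · by_cases hik : i = (k : Int)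
      · have hm : (k : Int) ∈ i :: rest := by rw [hik]; exact List.mem_cons_self
        rw [if_neg hk, hc1, if_pos hik, if_pos hm]
      · have hm : ¬ (k : Int) ∈ i :: rest := by
          intro h
          rcases List.mem_cons.1 h with h | h
          · exact hik h.symm
          · exact hk h
        rw [if_neg hk, hc1, if_neg hik, if_neg hm]

theorem pvSetOut {α : Type} (xs : List α) (i : Int) (hi : 0 ≤ i)
    (hlen : (xs.length : Int) ≤ i) (v : α) : PySem.List.pySetD xs i v = xs := by
  unfold PySem.List.pySetD PySem.List.pySet? PySem.List.pyIdx?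
  split_ifs <;> simp_all <;> omega

theorem pvGetDSet {α : Type} (xs : List α) (i : Int) (hi : 0 ≤ i)
    (hlen : i < (xs.length : Int)) (v d : α) :
    PySem.List.pyGetD (PySem.List.pySetD xs i v) i d = v := by
  unfold PySem.List.pyGetD PySem.List.pyGet? PySem.List.pySetD PySem.List.pySet?
    PySem.List.pyIdx?
  split_ifs <;> simp_all [List.getElem?_set] <;> omega

theorem pvSetSet {α : Type} (xs : List α) (i : Int) (hi : 0 ≤ i) (v w : α) :
    PySem.List.pySetD (PySem.List.pySetD xs i v) i w = PySem.List.pySetD xs i w := by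
  by_cases hlen : i < (xs.length : Int)
  · unfold PySem.List.pySetD PySem.List.pySet? PySem.List.pyIdx?
    split_ifs <;> simp_all [List.set_set] <;> omega
  · rw [pvSetOut xs i hi (by omega) v]

-- an inner loop over j that edits only row i equals one write of the folded row
theorem pvInnerRow (i : Int) (hi : 0 ≤ i) :
    ∀ (js : List Int) (c : List (List Int)),
      js.foldl (fun c j =>
          PySem.List.pySetD c i (PySem.List.pySetD (PySem.List.pyGetD c i []) j 1)) c =
        PySem.List.pySetD c i
          (js.foldl (fun row j => PySem.List.pySetD row j (1 : Int))
            (PySem.List.pyGetD c i [])) := by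
  intro js
  induction js with
  | nil =>
    intro c
    by_cases hlen : i < (c.length : Int)
    · simp only [List.foldl_nil]
      apply List.ext_getElem?
      intro k
      rw [pvGetSet c i hi _ k]
      by_cases hik : i = (k : Int)
      · subst hik
        by_cases hk : k < c.length
        · rw [PySem.List.pyGetD_natCast c k []]
          simp [hk, List.getD_eq_getElem?_getD, List.getElem?_eq_getElem hk]
        · simp [hk]
      · simp [hik]
    · simp [pvSetOut c i hi (by omega)]
  | cons j rest ih =>
    intro c
    simp only [List.foldl_cons]
    rw [ih]
    by_cases hlen : i < (c.length : Int)
    · rw [pvGetDSet c i hi hlen, pvSetSet c i hi]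
    · rw [pvSetOut c i hi (by omega), pvSetOut c i hi (by omega),
        pvSetOut c i hi (by omega)]

-- the vertical-streets pass: for each odd j, every row (all indices lie in `is`) gets column j set
theorem pvOuterCols (is : List Int) (hnn : ∀ i ∈ is, 0 ≤ i) (hnd : is.Nodup) :
    ∀ (js : List Int) (cs : List (List Int))
      (_ : ∀ k : Nat, k < cs.length → (k : Int) ∈ is) (k : Nat),
      (js.foldl (fun c j =>
          is.foldl (fun c i =>
            PySem.List.pySetD c i (PySem.List.pySetD (PySem.List.pyGetD c i []) j 1)) c) cs)[k]? =
        (cs[k]?).map (fun row => js.foldl (fun row j => PySem.List.pySetD row j (1 : Int)) row) := by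
  intro js
  induction js with
  | nil => intro cs _ k; cases h : cs[k]? <;> simp [h]
  | cons j rest ih =>
    intro cs hcov k
    simp only [List.foldl_cons]
    have hlen : (is.foldl (fun c i =>
        PySem.List.pySetD c i (PySem.List.pySetD (PySem.List.pyGetD c i []) j 1)) cs).length
        = cs.length :=
      pvLenFold (fun c i => PySem.List.pySetD (PySem.List.pyGetD c i []) j 1) _ cs
    rw [ih _ (fun k hk => hcov k (by rw [hlen] at hk; exact hk)) k]
    rw [pvGetModify (fun row => PySem.List.pySetD row j 1) [] is cs hnn hnd k]
    by_cases hk : k < cs.length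
    · simp [hcov k hk, Option.map_map, Function.comp_def]
    · simp [List.getElem?_eq_none_iff.2 (le_of_not_gt hk)]

theorem pvMemOdd (n : Int) (k : Nat) :
    (k : Int) ∈ PySem.List.pyRange 1 n 2 ↔ (k : Int) < n ∧ k % 2 = 1 := by
  rw [PySem.List.mem_pyRange_iff_of_pos (by norm_num)]
  omega

theorem pvA_eq_G (linhas colunas : Int) :
    gerar_cidade linhas colunas = pvG linhas.toNat colunas.toNat := by
  have hoddR : ∀ i ∈ PySem.List.pyRange 1 linhas 2, (0:Int) ≤ i := fun i hmem => by
    have := ((PySem.List.mem_pyRange_iff_of_pos (by norm_num) i).1 hmem).1; omega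
  have hoddC : ∀ j ∈ PySem.List.pyRange 1 colunas 2, (0:Int) ≤ j := fun j hmem => by
    have := ((PySem.List.mem_pyRange_iff_of_pos (by norm_num) j).1 hmem).1; omega
  unfold gerar_cidade
  simp only [pvRange01]
  set O2 := PySem.List.pyRange 1 colunas 2 with hO2
  set R1 := PySem.List.pyRange 1 linhas 2 with hR1
  set G := fun row => O2.foldl (fun row j => PySem.List.pySetD row j (1 : Int)) row with hG
  set I0 := List.map (fun k : Nat => (k : Int)) (List.range linhas.toNat) with hI0
  set row0 := List.map (fun _ => (0 : Int))
    (List.map (fun k : Nat => (k : Int)) (List.range colunas.toNat)) with hrow0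
  set s0 := List.map (fun _ => row0) I0 with hs0
  set s1 := R1.foldl (fun c i =>
    PySem.List.pySetD c i (List.replicate colunas.toNat (1 : Int))) s0 with hs1
  set s2 := O2.foldl (fun c j =>
    I0.foldl (fun c i =>
      PySem.List.pySetD c i (PySem.List.pySetD (PySem.List.pyGetD c i []) j 1)) c) s1 with hs2
  -- lengths and index facts
  have hlen0 : s0.length = linhas.toNat := by rw [hs0, hI0]; simp
  have hlen1 : s1.length = linhas.toNat := by
    rw [hs1]
    exact (pvLenFold (fun _ _ => List.replicate colunas.toNat (1 : Int)) R1 s0).trans hlen0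
  have hrow0len : row0.length = colunas.toNat := by rw [hrow0]; simp
  have hGlen : ∀ row : List Int, (G row).length = row.length := fun row => by
    rw [hG]; exact pvLenFold (fun _ _ => (1:Int)) O2 row
  have hGget : ∀ (row : List Int) (c : Nat), (G row)[c]? =
      if (c : Int) ∈ O2 ∧ c < row.length then some 1 else row[c]? := fun row c => by
    rw [hG]; exact pvGetConstFold 1 O2 row hoddC c
  have hnnI0 : ∀ i ∈ I0, (0:Int) ≤ i := by
    intro i h; rw [hI0] at h; simp only [List.mem_map, List.mem_range] at h
    obtain ⟨a, _, rfl⟩ := h; exact Int.natCast_nonneg a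
  have hndI0 : I0.Nodup := by
    rw [hI0]; exact List.nodup_range.map (fun x y h => by exact_mod_cast h)
  have hcov : ∀ k : Nat, k < s1.length → (k : Int) ∈ I0 := by
    intro k hk; rw [hlen1] at hk; rw [hI0]
    simp only [List.mem_map, List.mem_range]
    exact ⟨k, hk, rfl⟩
  apply List.ext_getElem?
  intro k
  -- step 3 (intersections): each outer body is one write of a folded row (pvInnerRow)
  rw [PySem.List.foldl_congr_mem _ _
    (fun c i => PySem.List.pySetD c i (G (PySem.List.pyGetD c i [])))
    _ (fun c i hmem => pvInnerRow i (hoddR i hmem) O2 c)]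
  rw [pvGetModify G [] R1 s2 hoddR (pvNodupRange 1 linhas 2 (by norm_num)) k]
  -- step 2 (vertical streets)
  have hstep2 : s2[k]? = (s1[k]?).map G := by
    rw [hs2, hG]; exact pvOuterCols I0 hnnI0 hndI0 O2 s1 hcov k
  -- step 1 (horizontal streets)
  have hstep1 : s1[k]? = if (k : Int) ∈ R1 ∧ k < linhas.toNat
      then some (List.replicate colunas.toNat (1 : Int)) else s0[k]? := by
    rw [hs1, pvGetConstFold _ R1 s0 hoddR k, hlen0]
  -- base grid and target grid, elementwise
  have hbase : s0[k]? = if k < linhas.toNat then some row0 else none := by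
    rw [hs0, List.getElem?_map]
    by_cases hk : k < linhas.toNat
    · rw [hI0, List.getElem?_map, List.getElem?_range hk]; simp [hk]
    · rw [List.getElem?_eq_none_iff.2 (by rw [hI0]; simpa using le_of_not_gt hk)]
      simp [hk]
  have htgt : (pvG linhas.toNat colunas.toNat)[k]? = if k < linhas.toNat then
      some ((List.range colunas.toNat).map
        (fun j => if k % 2 = 1 ∨ j % 2 = 1 then (1 : Int) else 0)) else none := by
    unfold pvG
    rw [List.getElem?_map]
    by_cases hk : k < linhas.toNat
    · rw [List.getElem?_range hk]; simp [hk]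
    · rw [List.getElem?_eq_none_iff.2 (by simpa using le_of_not_gt hk)]; simp [hk]
  rw [hstep2, hstep1, hbase, htgt]
  by_cases hk : k < linhas.toNat
  · simp only [hk, if_true]
    by_cases hodd : k % 2 = 1
    · have hmem : (k : Int) ∈ R1 := by
        rw [hR1]; exact (pvMemOdd linhas k).2 ⟨by omega, hodd⟩
      simp only [hmem, hk, and_self, if_true, Option.map_some]
      congr 1
      apply List.ext_getElem?
      intro c
      rw [hGget, hGlen, hGget, List.length_replicate]
      by_cases hc : c < colunas.toNat
      · rw [List.getElem?_map, List.getElem?_range hc]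
        by_cases hcm : (c : Int) ∈ O2 <;>
          simp [hcm, hc, hodd, List.getElem?_replicate]
      · rw [List.getElem?_map,
          List.getElem?_eq_none_iff.2 (by simpa using le_of_not_gt hc),
          List.getElem?_eq_none_iff.2 (by simpa [List.length_replicate] using le_of_not_gt hc)]
        simp [hc]
    · have hmem : ¬ (k : Int) ∈ R1 := fun h =>
        hodd ((pvMemOdd linhas k).1 (hR1 ▸ h)).2
      simp only [hmem, hk, false_and, if_false, Option.map_some]
      congr 1
      apply List.ext_getElem?
      intro c
      rw [hGget, hrow0len]
      by_cases hc : c < colunas.toNat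
      · have hz : row0[c]? = some 0 := by
          rw [hrow0, List.getElem?_map, List.getElem?_map, List.getElem?_range hc]; rfl
        rw [hz, List.getElem?_map, List.getElem?_range hc]
        by_cases hcm : (c : Int) ∈ O2
        · have := (pvMemOdd colunas c).1 (hO2 ▸ hcm)
          simp [hcm, hc, this.2]
        · have hce : ¬ c % 2 = 1 := fun h =>
            hcm (hO2 ▸ (pvMemOdd colunas c).2 ⟨by omega, h⟩)
          simp [hcm, hodd, hce]
      · have h1 : row0[c]? = none :=
          List.getElem?_eq_none_iff.2 (by rw [hrow0len]; exact le_of_not_gt hc)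
        have h2 : (List.map (fun j => if k % 2 = 1 ∨ j % 2 = 1 then (1:Int) else 0)
            (List.range colunas.toNat))[c]? = none :=
          List.getElem?_eq_none_iff.2 (by simpa using le_of_not_gt hc)
        rw [h1, h2]
        simp [hc]
  · have hmem : ¬ (k : Int) ∈ R1 := fun h => by
      have := (pvMemOdd linhas k).1 (hR1 ▸ h); omega
    simp [hmem, hk]

theorem pvB_eq_G (linhas colunas : Int) :
    gerar_cidade_alt linhas colunas = pvG linhas.toNat colunas.toNat := by
  unfold gerar_cidade_alt pvG
  simp only [pvRange01, List.map_map]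
  apply List.map_congr_left
  intro i _
  simp only [Function.comp_apply]
  apply List.map_congr_left
  intro j _
  simp only [Function.comp_apply]
  have hm : ∀ n : Nat, PySem.Int.mod (n : Int) 2 = ((n % 2 : Nat) : Int) := fun n => by
    have := PySem.Int.mod_natCast n 2; exact_mod_cast this
  have h : (((i % 2 : Nat) : Int) = 1 ∨ ((j % 2 : Nat) : Int) = 1) ↔
      (i % 2 = 1 ∨ j % 2 = 1) := by omega
  simp only [hm, h]

-- ===== VERDICT (by name: the statement is the Claim_ definition above) =====
theorem gerar_cidade_spec : Claim_equal_gerar_cidade := by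
  intro linhas colunas _
  unfold Spec_gerar_cidade
  rw [pvA_eq_G, pvB_eq_G]
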